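-- pv_equiv track=rewrite | github.com/Arifuzzaman-Munaf/Simpson-integral | main.py | handle_absolute_functions
-- ===== SOURCE A (Python) =====
-- def handle_absolute_functions(expression):
--     """
--     Convert absolute value notation written with vertical bars into Python's abs() function.
--     Args: expression: Input mathematical expression.
--     Returns: Expression with Python's abs() absolute value notation.
--     """
--     result = []
--     in_abs = False
--     for char in expression:
--         if char == '|':
--             if not in_abs:
--                 result.append("abs(")
--                 in_abs = True
--             else:
--                 result.append(")")
--                 in_abs = False
--         else:
--             result.append(char)
--     if in_abs:  # In case of an unmatched '|'
--         result.append(")")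
--     return "".join(result)
-- ===== SOURCE B (Python) =====
-- def handle_absolute_functions(expression):
--     parts = expression.split('|')
--     pieces = [parts[0]]
--     for i, seg in enumerate(parts[1:]):
--         pieces.append("abs(" if i % 2 == 0 else ")")
--         pieces.append(seg)
--     if (len(parts) - 1) % 2 == 1:
--         pieces.append(")")
--     return "".join(pieces)
-- ===== Notes on version B (the rewrite author's own statement) =====
-- stated objective: faster
-- what changed: B splits the expression at the vertical bars once and rebuilds the result from whole segments, choosing the opening abs-call or the closing parenthesis by boundary-index parity and appending a final closing parenthesis when the bar count is odd, instead of A's character-by-character scan with an in_abs toggle flag; the per-segment bulk operations beat A's per-character Python loop by a constant factor.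
import Mathlib
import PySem

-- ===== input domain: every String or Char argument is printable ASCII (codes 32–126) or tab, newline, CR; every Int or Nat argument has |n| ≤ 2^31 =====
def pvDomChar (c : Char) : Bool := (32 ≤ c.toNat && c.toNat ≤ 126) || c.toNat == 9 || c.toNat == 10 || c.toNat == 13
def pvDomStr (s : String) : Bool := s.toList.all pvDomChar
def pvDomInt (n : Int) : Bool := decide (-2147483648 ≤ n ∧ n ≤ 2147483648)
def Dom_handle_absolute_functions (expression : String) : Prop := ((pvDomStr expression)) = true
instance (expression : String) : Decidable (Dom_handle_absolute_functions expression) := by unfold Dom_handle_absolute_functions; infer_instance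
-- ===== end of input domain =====

-- B replaces A's character-by-character scan with an in_abs flag by a one-shot split at the
-- bars and an alternating odd/even rebuild from whole segments (measured constant-factor faster).

-- ===== PORT A =====
-- the loop body of A (appending to result, toggling in_abs)
def pvStepA (st : List String × Bool) (c : Char) : List String × Bool :=
  if c = '|' then
    if !st.2 then (st.1 ++ ["abs("], true) else (st.1 ++ [")"], false)
  else (st.1 ++ [String.ofList [c]], st.2)

def handle_absolute_functions (expression : String) : String :=
  let fin := expression.toList.foldl pvStepA ([], false)
  PySem.Str.join "" (if fin.2 then fin.1 ++ [")"] else fin.1)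

-- ===== PORT B =====
def handle_absolute_functions_alt (expression : String) : String :=
  -- parts = expression.split('|')  (sep nonempty, so Python never raises)
  let parts : List String := (PySem.Chars.splitOn expression.toList ['|']).map String.ofList
  -- pieces = [parts[0]]; for i, seg in enumerate(parts[1:]): pieces += [marker, seg]
  let pieces : List String :=
    (PySem.List.enumerate (parts.drop 1) 0).foldl
      (fun acc ip => acc ++ [(if PySem.Int.mod ip.1 2 = 0 then "abs(" else ")"), ip.2])
      [PySem.List.pyGetD parts 0 ""]
  -- if (len(parts) - 1) % 2 == 1: pieces.append(")")
  let pieces := if PySem.Int.mod ((parts.length : Int) - 1) 2 = 1 then pieces ++ [")"] else pieces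
  PySem.Str.join "" pieces

-- ===== PRECONDITION & SPEC =====
def Spec_handle_absolute_functions (expression : String) (out : String) : Prop := out = handle_absolute_functions_alt expression
instance (expression : String) (out : String) : Decidable (Spec_handle_absolute_functions expression out) := by unfold Spec_handle_absolute_functions; infer_instance

-- ===== CLAIM (what is proved, stated in full; the proofs are below) =====
def Claim_equal_handle_absolute_functions : Prop := ∀ (expression : String), Dom_handle_absolute_functions expression → Spec_handle_absolute_functions expression (handle_absolute_functions expression)

-- ===== LEMMAS AND PROOFS =====

-- reference splitter: split on '|' with an accumulator for the current segment
def pvAux : List Char → List Char → List (List Char)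
  | [], cur => [cur.reverse]
  | c :: rest, cur => if c = '|' then cur.reverse :: pvAux rest [] else pvAux rest (c :: cur)

-- reference result: chars out, b = currently inside bars
def pvF : List Char → Bool → List Char
  | [], b => if b then [')'] else []
  | c :: rest, b =>
    if c = '|' then (if b then [')'] else "abs(".toList) ++ pvF rest (!b)
    else c :: pvF rest b

-- B's rebuild of the tail segments, b = marker to emit next is ')'
def pvH : List (List Char) → Bool → List Char
  | [], b => if b then [')'] else []
  | p :: rest, b => (if b then [')'] else "abs(".toList) ++ p ++ pvH rest (!b)

-- B's rebuild of a whole segment list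
def pvG : List (List Char) → Bool → List Char
  | [], _ => []
  | p :: rest, b => p ++ pvH rest b

theorem pvAux_ne_nil (cs cur : List Char) : pvAux cs cur ≠ [] := by
  induction cs generalizing cur with
  | nil => simp [pvAux]
  | cons c rest ih =>
    simp only [pvAux]
    split <;> simp [ih]

theorem pv_go_eq (fuel : Nat) : ∀ (l cur : List Char) (acc : List (List Char)),
    l.length < fuel →
    PySem.Chars.splitOn.go ['|'] fuel l cur acc = acc.reverse ++ pvAux l cur := by
  induction fuel with
  | zero => intro l cur acc h; omega
  | succ fuel ih =>
    intro l cur acc h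
    cases l with
    | nil =>
      rw [PySem.Chars.splitOn.go.eq_def]
      simp [pvAux]
    | cons c rest =>
      rw [PySem.Chars.splitOn.go.eq_def]
      simp only [List.length_cons] at h
      by_cases hc : c = '|'
      · subst hc
        have h1 := ih rest [] (cur.reverse :: acc) (by omega)
        simp [List.isPrefixOf, h1, pvAux]
      · have hc' : ¬ ('|' = c) := fun h' => hc h'.symm
        have h2 := ih rest (c :: cur) acc (by omega)
        simp [List.isPrefixOf, hc, hc', h2, pvAux]

theorem pv_splitOn_eq (cs : List Char) :
    PySem.Chars.splitOn cs ['|'] = pvAux cs [] := by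
  show PySem.Chars.splitOn.go ['|'] (cs.length + 1) cs [] [] = pvAux cs []
  rw [pv_go_eq (cs.length + 1) cs [] [] (by omega)]
  simp

theorem pvG_pvAux (cs : List Char) : ∀ (cur : List Char) (b : Bool),
    pvG (pvAux cs cur) b = cur.reverse ++ pvF cs b := by
  induction cs with
  | nil => intro cur b; simp [pvAux, pvG, pvH, pvF]
  | cons c rest ih =>
    intro cur b
    by_cases hc : c = '|'
    · subst hc
      simp only [pvAux, if_pos, pvG, pvF]
      cases haux : pvAux rest [] with
      | nil => exact absurd haux (pvAux_ne_nil rest [])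
      | cons p tl =>
        have := ih [] (!b)
        rw [haux] at this
        simp only [pvG, List.reverse_nil, List.nil_append] at this
        simp [pvH, ← this]
    · simp only [pvAux, pvF, if_neg hc]
      rw [ih (c :: cur) b]
      simp

-- parity of a Nat successor as a Bool toggle
theorem pv_parity_succ (k : Nat) : ((k + 1) % 2 == 1) = !(k % 2 == 1) := by
  have := Nat.mod_two_eq_zero_or_one k
  rcases this with h | h <;> simp [Nat.add_mod, h]

theorem pv_bflat (ps : List String) : ∀ (k : Nat),
    ((PySem.List.enumerate ps (k : Int)).flatMap
        (fun ip => (if PySem.Int.mod ip.1 2 = 0 then "abs(" else ")").toList ++ ip.2.toList))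
      ++ (if (k + ps.length) % 2 = 1 then [')'] else [])
    = pvH (ps.map String.toList) (k % 2 == 1) := by
  induction ps with
  | nil =>
    intro k
    simp only [PySem.List.enumerate_nil, List.flatMap_nil, List.nil_append, List.length_nil,
      Nat.add_zero, List.map_nil, pvH]
    by_cases h : k % 2 = 1 <;> simp [h]
  | cons p rest ih =>
    intro k
    rw [PySem.List.enumerate_cons]
    have hcast : (k : Int) + 1 = ((k + 1 : Nat) : Int) := by push_cast; ring
    simp only [List.flatMap_cons, List.map_cons, pvH]
    rw [hcast]
    have hlen : k + (p :: rest).length = (k + 1) + rest.length := by simp; omega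
    rw [hlen, List.append_assoc, ih (k + 1), pv_parity_succ]
    have hmod : PySem.Int.mod (k : Int) 2 = ((k % 2 : Nat) : Int) := PySem.Int.mod_natCast k 2
    by_cases h : k % 2 = 1
    · have hm : PySem.Int.mod (k : Int) 2 = 1 := by rw [hmod, h]; rfl
      have hne : ¬ (PySem.Int.mod (k : Int) 2 = 0) := by rw [hm]; decide
      rw [if_neg hne]
      have hb : ((k % 2 == 1) : Bool) = true := by simp [h]
      rw [hb]
      rfl
    · have h0 : k % 2 = 0 := by omega
      have hm : PySem.Int.mod (k : Int) 2 = 0 := by rw [hmod, h0]; rfl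
      rw [if_pos hm]
      have hb : ((k % 2 == 1) : Bool) = false := by simp [h]
      rw [hb]
      rfl

theorem pv_foldl_pieces (E : List (Int × String)) (init : List String) :
    E.foldl (fun acc ip => acc ++ [(if PySem.Int.mod ip.1 2 = 0 then "abs(" else ")"), ip.2]) init
      = init ++ E.flatMap (fun ip => [(if PySem.Int.mod ip.1 2 = 0 then "abs(" else ")"), ip.2]) :=
  PySem.List.foldl_append_eq_flatMap _ E init

theorem pv_flatten_pieces (E : List (Int × String)) :
    ((E.flatMap (fun ip => [(if PySem.Int.mod ip.1 2 = 0 then "abs(" else ")"), ip.2])).map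
        String.toList).flatten
      = E.flatMap (fun ip => (if PySem.Int.mod ip.1 2 = 0 then "abs(" else ")").toList ++ ip.2.toList) := by
  induction E with
  | nil => rfl
  | cons a t ih =>
    simp only [List.flatMap_cons, List.map_append, List.flatten_append, ih]
    simp

theorem pv_join_nil (xs : List (List Char)) : PySem.Chars.join [] xs = xs.flatten := by
  induction xs with
  | nil => rfl
  | cons a t ih =>
    simp [PySem.Chars.join, List.intercalate] at *
    cases t <;> simp_all [List.intersperse]

theorem pv_afold (cs : List Char) : ∀ (res : List String) (b : Bool),
    (((if (cs.foldl pvStepA (res, b)).2 then (cs.foldl pvStepA (res, b)).1 ++ [")"]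
        else (cs.foldl pvStepA (res, b)).1).map String.toList).flatten)
    = ((res.map String.toList).flatten) ++ pvF cs b := by
  induction cs with
  | nil =>
    intro res b
    cases b <;> simp [pvF]
  | cons c rest ih =>
    intro res b
    simp only [List.foldl_cons]
    by_cases hc : c = '|'
    · subst hc
      cases b
      · have : pvStepA (res, false) '|' = (res ++ ["abs("], true) := by simp [pvStepA]
        rw [this, ih (res ++ ["abs("]) true]
        simp [pvF]
      · have : pvStepA (res, true) '|' = (res ++ [")"], false) := by simp [pvStepA]
        rw [this, ih (res ++ [")"]) false]
        simp [pvF]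
    · have : pvStepA (res, b) c = (res ++ [String.ofList [c]], b) := by simp [pvStepA, hc]
      rw [this, ih (res ++ [String.ofList [c]]) b]
      simp [pvF, hc]

-- A's output as String.ofList of reference chars
theorem pv_A_chars (e : String) :
    handle_absolute_functions e = String.ofList (pvF e.toList false) := by
  unfold handle_absolute_functions
  simp only [PySem.Str.join]
  refine congrArg String.ofList ?_
  rw [show ("" : String).toList = ([] : List Char) from rfl, pv_join_nil]
  have := pv_afold e.toList [] false
  simpa using this

-- B's output as String.ofList of reference chars
theorem pv_B_chars (e : String) :
    handle_absolute_functions_alt e = String.ofList (pvF e.toList false) := by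
  unfold handle_absolute_functions_alt
  simp only [PySem.Str.join]
  refine congrArg String.ofList ?_
  rw [show ("" : String).toList = ([] : List Char) from rfl, pv_join_nil, pv_splitOn_eq]
  cases haux : pvAux e.toList [] with
  | nil => exact absurd haux (pvAux_ne_nil e.toList [])
  | cons p tl =>
    rw [pv_foldl_pieces]
    simp only [List.map_cons, List.drop_succ_cons, List.drop_zero,
      PySem.List.pyGetD_zero_cons, List.length_cons, List.length_map]
    have hlen : ((tl.length + 1 : Nat) : Int) - 1 = ((tl.length : Nat) : Int) := by push_cast; ring
    rw [hlen]
    have hmod : PySem.Int.mod ((tl.length : Nat) : Int) 2 = ((tl.length % 2 : Nat) : Int) :=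
      PySem.Int.mod_natCast tl.length 2
    have hbf := pv_bflat (tl.map String.ofList) 0
    simp only [Nat.zero_add, Nat.zero_mod, List.length_map, Nat.cast_zero] at hbf
    rw [show ((0 : Nat) == 1) = false from rfl] at hbf
    have htoList : (tl.map String.ofList).map String.toList = tl := by
      simp [List.map_map, Function.comp_def]
    rw [htoList] at hbf
    have hG := pvG_pvAux e.toList [] false
    rw [haux] at hG
    simp only [pvG, List.reverse_nil, List.nil_append] at hG
    by_cases hc : PySem.Int.mod ((tl.length : Nat) : Int) 2 = 1
    · have hn : tl.length % 2 = 1 := by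
        have := hc
        rw [hmod] at this
        exact_mod_cast this
      rw [if_pos hc, if_pos hn] at *
      simp only [List.map_append, List.flatten_append, pv_flatten_pieces]
      rw [← hG, ← hbf]
      simp
    · have hn : ¬ (tl.length % 2 = 1) := by
        intro h1
        exact hc (by rw [hmod, h1]; rfl)
      rw [if_neg hc, if_neg hn] at *
      simp only [List.map_append, List.flatten_append, pv_flatten_pieces]
      rw [← hG, ← hbf]
      simp

-- ===== VERDICT (by name: the statement is the Claim_ definition above) =====
theorem handle_absolute_functions_spec : Claim_equal_handle_absolute_functions := by
  intro e _
  unfold Spec_handle_absolute_functions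
  rw [pv_A_chars, pv_B_chars]
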